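-- pv_equiv track=rewrite | github.com/bledidalipaj/codefights | challenges/python/isitpoem.py | isItPoem
-- ===== SOURCE A (Python) =====
-- def isItPoem(rhyme, text):
--     M = len(rhyme)
--     N = len(text)
--
--     for i in range(M):
--         for j in range(i + 1, M):
--             if rhyme[i] == rhyme[j]:
--                 k = 0
--                 while i + k * M < N and j + k * M < N:
--                     if text[i + k * M][-3:] != text[j + k * M][-3:]:
--                         return False
--                     k += 1
--     return True
-- ===== SOURCE B (Python) =====
-- def isItPoem(rhyme, text):
--     M = len(rhyme)
--     if M == 0:
--         return True
--     seen = {}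
--     for p, line in enumerate(text):
--         key = (rhyme[p % M], p // M)
--         suf = line[-3:]
--         if key in seen:
--             if seen[key] != suf:
--                 return False
--         else:
--             seen[key] = suf
--     return True
-- ===== Notes on version B (the rewrite author's own statement) =====
-- stated objective: faster
-- what changed: Instead of comparing every pair of equal rhyme letters and re-scanning the text for each pair, B makes a single pass over the lines, grouping each line by (rhyme letter, stanza index) in a dict and comparing its 3-char suffix to the first line seen in that group.
import Mathlib
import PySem

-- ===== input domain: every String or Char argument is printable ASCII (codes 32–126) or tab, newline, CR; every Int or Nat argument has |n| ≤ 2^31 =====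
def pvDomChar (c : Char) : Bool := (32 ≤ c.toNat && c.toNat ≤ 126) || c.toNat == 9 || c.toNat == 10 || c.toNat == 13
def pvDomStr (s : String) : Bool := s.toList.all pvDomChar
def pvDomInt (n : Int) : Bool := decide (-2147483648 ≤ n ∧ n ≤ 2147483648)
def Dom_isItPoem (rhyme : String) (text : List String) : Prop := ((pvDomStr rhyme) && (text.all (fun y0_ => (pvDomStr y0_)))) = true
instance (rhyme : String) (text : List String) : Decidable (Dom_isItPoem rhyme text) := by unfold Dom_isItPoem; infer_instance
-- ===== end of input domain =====

-- B replaces A's quadratic pairwise comparison of rhyme positions by one pass over the lines,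
-- grouping each line by (rhyme letter, stanza index) in a dict and comparing its 3-char suffix
-- to the first line seen in its group (objective: faster, O(M^2 + M*N) -> O(N + M)).

-- shared helper: Python `line[-3:]` on the character list (PySem.List.slice is Python's clamped slice)
def sfx3 (s : String) : List Char := PySem.List.slice s.toList (some (-3)) none

-- ===== PORT A =====
-- the inner `while` loop of A; `fuel` only makes the recursion structural (called with fuel = N;
-- since the call sites have 1 ≤ j < M the loop body can run at most N times, so fuel never runs out)
def whileA (text : List String) (M N i j : Nat) : Nat → Nat → Bool
  | 0, _ => true
  | fuel+1, k =>
    if i + k * M < N ∧ j + k * M < N then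
      if sfx3 (text.getD (i + k * M) "") ≠ sfx3 (text.getD (j + k * M) "") then false
      else whileA text M N i j fuel (k + 1)
    else true

def isItPoem (rhyme : String) (text : List String) : Bool :=
  let r := rhyme.toList
  let M := r.length
  let N := text.length
  (List.range M).all fun i =>
    (List.range' (i + 1) (M - (i + 1))).all fun j =>
      if r.getD i ' ' = r.getD j ' ' then whileA text M N i j N 0 else true

-- ===== PORT B =====
def loopB (r : List Char) (M : Nat) : List String → Nat → PySem.Dict (Char × Nat) (List Char) → Bool
  | [], _, _ => true
  | line :: rest, p, seen =>
    let key : Char × Nat := (r.getD (p % M) ' ', p / M)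
    let suf := sfx3 line
    match seen.get? key with
    | some v => if v ≠ suf then false else loopB r M rest (p + 1) seen
    | none => loopB r M rest (p + 1) (seen.insert key suf)

def isItPoem_alt (rhyme : String) (text : List String) : Bool :=
  let r := rhyme.toList
  if r.length = 0 then true
  else loopB r r.length text 0 PySem.Dict.empty

-- ===== PRECONDITION & SPEC =====
def Spec_isItPoem (rhyme : String) (text : List String) (out : Bool) : Prop := out = isItPoem_alt rhyme text
instance (rhyme : String) (text : List String) (out : Bool) : Decidable (Spec_isItPoem rhyme text out) := by unfold Spec_isItPoem; infer_instance

-- ===== CLAIM (what is proved, stated in full; the proofs are below) =====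
def Claim_equal_isItPoem : Prop := ∀ (rhyme : String) (text : List String), Dom_isItPoem rhyme text → Spec_isItPoem rhyme text (isItPoem rhyme text)

-- ===== LEMMAS AND PROOFS =====

-- key of line position p : (rhyme letter of p, stanza of p)
def keyOf (r : List Char) (p : Nat) : Char × Nat := (r.getD (p % r.length) ' ', p / r.length)

-- the common specification: any two lines with the same key have equal 3-char suffixes
def Good (r : List Char) (text : List String) : Prop :=
  ∀ p q : Nat, p < q → q < text.length → keyOf r p = keyOf r q →
    sfx3 (text.getD p "") = sfx3 (text.getD q "")

theorem whileA_iff (text : List String) (M N i j : Nat) (fuel k : Nat) :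
    whileA text M N i j fuel k = true ↔
      ∀ t < fuel, (i + (k + t) * M < N ∧ j + (k + t) * M < N) →
        sfx3 (text.getD (i + (k + t) * M) "") = sfx3 (text.getD (j + (k + t) * M) "") := by
  induction fuel generalizing k with
  | zero => simp [whileA]
  | succ fuel ih =>
    rw [whileA]
    by_cases hc : i + k * M < N ∧ j + k * M < N
    · rw [if_pos hc]
      by_cases hs : sfx3 (text.getD (i + k * M) "") = sfx3 (text.getD (j + k * M) "")
      · rw [if_neg (by simpa using hs), ih]
        constructor
        · intro h t ht hcond
          match t with
          | 0 => simpa using hs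
          | t + 1 =>
            have := h t (by omega)
            rw [show k + 1 + t = k + (t + 1) by omega] at this
            exact this hcond
        · intro h t ht
          have := h (t + 1) (by omega)
          rw [show k + (t + 1) = k + 1 + t by omega] at this
          exact this
      · rw [if_pos (by simpa using hs)]
        constructor
        · intro h; exact absurd h (by simp)
        · intro h
          exact absurd (by simpa using h 0 (by omega) (by simpa using hc)) hs
    · rw [if_neg hc]
      constructor
      · intro _ t _ hcond
        exfalso; apply hc
        have hi : i + k * M ≤ i + (k + t) * M :=
          Nat.add_le_add_left (Nat.mul_le_mul_right M (Nat.le_add_right k t)) i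
        have hj : j + k * M ≤ j + (k + t) * M :=
          Nat.add_le_add_left (Nat.mul_le_mul_right M (Nat.le_add_right k t)) j
        exact ⟨lt_of_le_of_lt hi hcond.1, lt_of_le_of_lt hj hcond.2⟩
      · intro _; rfl

theorem A_iff (rhyme : String) (text : List String) (hM : 0 < rhyme.toList.length) :
    isItPoem rhyme text = true ↔ Good rhyme.toList text := by
  have hMN : isItPoem rhyme text = true ↔
      ∀ i j, i < j → j < rhyme.toList.length → rhyme.toList.getD i ' ' = rhyme.toList.getD j ' ' →
        ∀ k, (i + k * rhyme.toList.length < text.length ∧ j + k * rhyme.toList.length < text.length) →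
          sfx3 (text.getD (i + k * rhyme.toList.length) "") = sfx3 (text.getD (j + k * rhyme.toList.length) "") := by
    rw [isItPoem]
    simp only [List.all_eq_true, List.mem_range, List.mem_range'_1]
    constructor
    · intro h i j hij hjM hchar k hcond
      have hw := h i (lt_trans hij hjM) j ⟨by omega, by omega⟩
      rw [if_pos hchar] at hw
      have hk : k < text.length := by
        have h1 : k ≤ k * rhyme.toList.length := Nat.le_mul_of_pos_right k hM
        omega
      have := (whileA_iff text rhyme.toList.length text.length i j text.length 0).mp hw k hk
        (by simpa using hcond)
      simpa using this
    · intro h i _ j hj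
      split_ifs with hchar
      · rw [whileA_iff]
        intro t _ hcond
        simpa using h i j (by omega) (by omega) hchar t (by simpa using hcond)
      · rfl
  rw [hMN]
  constructor
  · intro h p q hpq hq hkey
    have hdiv : p / rhyme.toList.length = q / rhyme.toList.length := congrArg Prod.snd hkey
    have hchar : rhyme.toList.getD (p % rhyme.toList.length) ' ' =
        rhyme.toList.getD (q % rhyme.toList.length) ' ' := congrArg Prod.fst hkey
    have hp := Nat.div_add_mod p rhyme.toList.length
    have hq' := Nat.div_add_mod q rhyme.toList.length
    have hmul : rhyme.toList.length * (p / rhyme.toList.length) =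
        rhyme.toList.length * (q / rhyme.toList.length) := by rw [hdiv]
    have hij : p % rhyme.toList.length < q % rhyme.toList.length := by linarith
    have := h (p % rhyme.toList.length) (q % rhyme.toList.length) hij
      (Nat.mod_lt q hM) hchar (p / rhyme.toList.length)
      ⟨by rw [hdiv] at hmul ⊢; linarith [Nat.mod_lt p hM], by linarith⟩
    rw [show p % rhyme.toList.length + p / rhyme.toList.length * rhyme.toList.length = p by
        rw [Nat.mul_comm]; omega,
      show q % rhyme.toList.length + p / rhyme.toList.length * rhyme.toList.length = q by
        rw [hdiv, Nat.mul_comm]; omega] at this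
    exact this
  · intro h i j hij hjM hchar k hcond
    apply h (i + k * rhyme.toList.length) (j + k * rhyme.toList.length) (by omega) hcond.2
    unfold keyOf
    rw [Nat.add_mul_mod_self_right, Nat.add_mul_mod_self_right,
      Nat.add_mul_div_right _ _ hM, Nat.add_mul_div_right _ _ hM,
      Nat.mod_eq_of_lt (lt_trans hij hjM), Nat.mod_eq_of_lt hjM,
      Nat.div_eq_of_lt (lt_trans hij hjM), Nat.div_eq_of_lt hjM, hchar]

-- the 3-char suffix of the first line (at offsets p, p+1, … of `rest`) whose key is `key`
def firstWith (r : List Char) : Nat → List String → (Char × Nat) → Option (List Char)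
  | _, [], _ => none
  | p, line :: rest, key =>
    if keyOf r p = key then some (sfx3 line) else firstWith r (p + 1) rest key

theorem fw_of_min (r : List Char) (rest : List String) (p t : Nat) (key : Char × Nat)
    (ht : t < rest.length) (hk : keyOf r (p + t) = key)
    (hmin : ∀ t' < t, keyOf r (p + t') ≠ key) :
    firstWith r p rest key = some (sfx3 (rest.getD t "")) := by
  induction rest generalizing p t with
  | nil => simp at ht
  | cons line rest ih =>
    by_cases h0 : keyOf r p = key
    · have ht0 : t = 0 := by
        by_contra hne
        exact hmin 0 (by omega) (by simpa using h0)
      subst ht0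
      simp [firstWith, h0]
    · have ht0 : t ≠ 0 := by
        intro hz; subst hz; exact h0 (by simpa using hk)
      obtain ⟨t', rfl⟩ : ∃ t', t = t' + 1 := ⟨t - 1, by omega⟩
      rw [firstWith, if_neg h0]
      have := ih (p + 1) t' (by simpa using Nat.lt_of_succ_lt_succ ht)
        (by rw [show p + 1 + t' = p + (t' + 1) by omega]; exact hk)
        (fun t'' ht'' => by
          rw [show p + 1 + t'' = p + (t'' + 1) by omega]
          exact hmin (t'' + 1) (by omega))
      simpa using this

theorem loopB_iff (r : List Char) (rest : List String) (p : Nat)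
    (seen : PySem.Dict (Char × Nat) (List Char)) :
    loopB r r.length rest p seen = true ↔
      ∀ t < rest.length,
        ((seen.get? (keyOf r (p + t))).or (firstWith r p rest (keyOf r (p + t)))) =
          some (sfx3 (rest.getD t "")) := by
  induction rest generalizing p seen with
  | nil => simp [loopB]
  | cons line rest ih =>
    rw [loopB]
    rw [show (r.getD (p % r.length) ' ', p / r.length) = keyOf r p from rfl]
    split
    case h_2 hseen =>
      rw [ih]
      constructor
      · intro h t ht
        cases t with
        | zero => simp [firstWith, hseen]
        | succ t' =>
          have h' := h t' (by simpa using Nat.lt_of_succ_lt_succ ht)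
          rw [show p + 1 + t' = p + (t' + 1) by omega] at h'
          simp only [List.getD_cons_succ]
          by_cases hk : keyOf r p = keyOf r (p + (t' + 1))
          · rw [← hk, PySem.Dict.get?_insert_self] at h'
            rw [firstWith, if_pos hk, ← hk, hseen, Option.none_or]
            simpa using h'
          · rw [PySem.Dict.get?_insert_of_ne _ _ (fun h'' => hk h''.symm)] at h'
            rw [firstWith, if_neg hk]
            exact h'
      · intro h t ht
        have h' := h (t + 1) (by simp only [List.length_cons]; omega)
        simp only [List.getD_cons_succ] at h'
        rw [show p + 1 + t = p + (t + 1) by omega]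
        by_cases hk : keyOf r p = keyOf r (p + (t + 1))
        · rw [firstWith, if_pos hk, ← hk, hseen, Option.none_or] at h'
          rw [← hk, PySem.Dict.get?_insert_self]
          simpa using h'
        · rw [firstWith, if_neg hk] at h'
          rw [PySem.Dict.get?_insert_of_ne _ _ (fun h'' => hk h''.symm)]
          exact h'
    case h_1 v hseen =>
      by_cases hv : v = sfx3 line
      · rw [if_neg (by simpa using hv), ih]
        constructor
        · intro h t ht
          cases t with
          | zero => simp [firstWith, hseen, hv]
          | succ t' =>
            have h' := h t' (by simpa using Nat.lt_of_succ_lt_succ ht)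
            rw [show p + 1 + t' = p + (t' + 1) by omega] at h'
            simp only [List.getD_cons_succ]
            by_cases hk : keyOf r p = keyOf r (p + (t' + 1))
            · rw [firstWith, if_pos hk]
              rw [← hk, hseen] at h' ⊢
              simpa using h'
            · rw [firstWith, if_neg hk]
              exact h'
        · intro h t ht
          have h' := h (t + 1) (by simp only [List.length_cons]; omega)
          simp only [List.getD_cons_succ] at h'
          rw [show p + 1 + t = p + (t + 1) by omega]
          by_cases hk : keyOf r p = keyOf r (p + (t + 1))
          · rw [firstWith, if_pos hk] at h'
            rw [← hk, hseen] at h' ⊢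
            simpa using h'
          · rw [firstWith, if_neg hk] at h'
            exact h'
      · rw [if_pos (by simpa using hv)]
        constructor
        · intro h; exact absurd h (by simp)
        · intro h
          have h' := h 0 (by simp)
          simp only [Nat.add_zero, List.getD_cons_zero] at h'
          rw [firstWith, if_pos rfl, hseen] at h'
          exact ((hv (Option.some.inj (by simpa using h')))).elim

theorem B_iff (rhyme : String) (text : List String) (hM : 0 < rhyme.toList.length) :
    isItPoem_alt rhyme text = true ↔ Good rhyme.toList text := by
  rw [isItPoem_alt]
  simp only [if_neg (Nat.pos_iff_ne_zero.mp hM)]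
  rw [loopB_iff]
  simp only [PySem.Dict.get?_empty, Option.or, Nat.zero_add]
  constructor
  · intro h p q hpq hq hkey
    have h1 := h p (lt_trans hpq hq)
    have h2 := h q hq
    rw [hkey] at h1
    rw [h1] at h2
    exact Option.some.inj h2
  · intro h t ht
    have hex : ∃ s, keyOf rhyme.toList s = keyOf rhyme.toList t := ⟨t, rfl⟩
    have hs := Nat.find_spec hex
    have hsle : Nat.find hex ≤ t := Nat.find_le rfl
    have := fw_of_min rhyme.toList text 0 (Nat.find hex) (keyOf rhyme.toList t)
      (by omega) (by simpa using hs)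
      (by intro t' ht' hcontra; exact Nat.find_min hex ht' (by simpa using hcontra))
    rw [this]
    rcases Nat.lt_or_ge (Nat.find hex) t with hlt | hge
    · rw [h (Nat.find hex) t hlt ht hs]
    · have : Nat.find hex = t := by omega
      rw [this]

-- ===== VERDICT (by name: the statement is the Claim_ definition above) =====
theorem isItPoem_spec : Claim_equal_isItPoem := by
  intro rhyme text _
  unfold Spec_isItPoem
  by_cases hM : rhyme.toList.length = 0
  · simp [isItPoem, isItPoem_alt, hM]
  · have h := (A_iff rhyme text (Nat.pos_of_ne_zero hM)).trans (B_iff rhyme text (Nat.pos_of_ne_zero hM)).symm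
    exact Bool.coe_iff_coe.mp h
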